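-- pv_equiv track=rewrite | github.com/hamza-dugmag/pygames | Gomoku/gomoku.py | get_sequences
-- ===== SOURCE A (Python) =====
-- def get_sequences(board, col, y_start, x_start, length, d_y, d_x):
--     """Generate all sequences of a certain length"""
--
--     sequences = []
--     s = []
--
--     for i in range(len(board)):
--         # Get the next square
--         square = [y_start + i*d_y, x_start + i*d_x]
--
--         try:
--             # Get the color of this square
--             current_col = board[square[0]][square[1]]
--         except IndexError:
--             # The current square is not a valid location on the board
--             if s not in sequences:
--                 sequences.append(s)
--             break
--
--         # Extend the sequence if it matches the desired color
--         if current_col == col: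
--             s.append(square)
--         else:
--             if s not in sequences:
--                 sequences.append(s)
--             s = []
--
--     # Append the final sequence in case checks were not conducted
--     if s not in sequences:
--         sequences.append(s)
--
--     # Truncate sequences that extend into invalid squares
--     for i in range(len(sequences)):
--         if sequences[i] == []:
--             continue
--
--         # Verify that all the coordinates are positive
--         for j in range(len(sequences[i])):
--             if sequences[i][j][0] < 0 or sequences[i][j][1] < 0:
--                 sequences[i] = sequences[i][:j]
--                 break
--
--     return sequences
-- ===== SOURCE B (Python) =====
-- def get_sequences(board, col, y_start, x_start, length, d_y, d_x):
--     """Generate all sequences of a certain length"""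
--
--     # Pass 1: materialise the visited squares and their match flag,
--     # stopping at the first off-board square (same IndexError boundary,
--     # including negative-index wraparound).
--     cells = []
--     for i in range(len(board)):
--         square = [y_start + i * d_y, x_start + i * d_x]
--         try:
--             current_col = board[square[0]][square[1]]
--         except IndexError:
--             break
--         cells.append((square, current_col == col))
--
--     # Pass 2: group consecutive matching squares into runs.
--     sequences = []
--     run = []
--     for square, matched in cells:
--         if matched:
--             run.append(square)
--         else:
--             if run not in sequences:
--                 sequences.append(run)
--             run = []
--     if run not in sequences:
--         sequences.append(run)
--
--     # Pass 3: truncate each run at its first negative coordinate.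
--     def cut(seq):
--         for j, sq in enumerate(seq):
--             if sq[0] < 0 or sq[1] < 0:
--                 return seq[:j]
--         return seq
--
--     return [cut(seq) for seq in sequences]
-- ===== Notes on version B (the rewrite author's own statement) =====
-- stated objective: alternative
-- what changed: A's single fused loop that looks up the board, accumulates a run and flushes it (plus a second in-place truncation loop) is split into three separate passes: materialise the visited squares with match flags up to the first IndexError, group that list into runs with the same first-empty dedup, then map a truncate-at-first-negative-coordinate function over the runs.
import Mathlib
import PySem

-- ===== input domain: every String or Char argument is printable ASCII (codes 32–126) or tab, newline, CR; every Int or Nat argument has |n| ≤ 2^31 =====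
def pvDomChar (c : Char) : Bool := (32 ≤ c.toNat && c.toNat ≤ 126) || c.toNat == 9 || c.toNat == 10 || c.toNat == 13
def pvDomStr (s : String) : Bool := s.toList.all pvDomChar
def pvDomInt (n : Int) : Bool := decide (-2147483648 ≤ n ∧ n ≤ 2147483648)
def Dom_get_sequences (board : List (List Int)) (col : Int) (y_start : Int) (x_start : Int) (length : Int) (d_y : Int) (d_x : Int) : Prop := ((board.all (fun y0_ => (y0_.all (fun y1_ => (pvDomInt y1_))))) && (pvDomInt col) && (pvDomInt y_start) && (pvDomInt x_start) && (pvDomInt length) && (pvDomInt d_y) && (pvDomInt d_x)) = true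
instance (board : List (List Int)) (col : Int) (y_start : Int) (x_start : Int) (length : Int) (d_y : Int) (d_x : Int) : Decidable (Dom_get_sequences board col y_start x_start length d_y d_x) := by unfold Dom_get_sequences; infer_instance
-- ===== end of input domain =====

-- B restructures A's single fused accumulate-and-flush loop into three passes
-- (materialise visited squares, group into runs, truncate); same cost, different
-- decomposition (objective: alternative). Equal return value on every input.

-- ===== PORT A =====
-- board[r][c] with Python indexing (negative wraps); none = IndexError
def pvGetColorA (board : List (List Int)) (r c : Int) : Option Int :=
  match PySem.List.pyGet? board r with
  | none => none
  | some row => PySem.List.pyGet? row c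

-- `if s not in sequences: sequences.append(s)`
def pvFlushA (seqs : List (List (List Int))) (s : List (List Int)) : List (List (List Int)) :=
  if s ∈ seqs then seqs else seqs ++ [s]

-- A's main `for i in range(len(board))` loop; returns (sequences, s) at loop exit
-- (break on IndexError, or range exhausted)
def pvLoopA (board : List (List Int)) (col y x dy dx : Int) (i : Nat)
    (seqs : List (List (List Int))) (s : List (List Int)) :
    List (List (List Int)) × List (List Int) :=
  if i < board.length then
    let sq : List Int := [y + (i : Int) * dy, x + (i : Int) * dx]
    match pvGetColorA board (y + (i : Int) * dy) (x + (i : Int) * dx) with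
    | none => (pvFlushA seqs s, s)
    | some c =>
      if c = col then pvLoopA board col y x dy dx (i + 1) seqs (s ++ [sq])
      else pvLoopA board col y x dy dx (i + 1) (pvFlushA seqs s) []
  else (seqs, s)
  termination_by board.length - i

-- squares are always 2-element lists [y.., x..], so getD is exact for sq[0]/sq[1]
def pvNegA (sq : List Int) : Bool := decide (sq.getD 0 0 < 0) || decide (sq.getD 1 0 < 0)

-- inner `for j in range(len(seq)) … seq[:j]; break` of A's truncation loop
def pvTruncGoA : List (List Int) → List (List Int)
  | [] => []
  | sq :: rest => if pvNegA sq then [] else sq :: pvTruncGoA rest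

-- A's truncation body for one sequence, including the `== []: continue` branch
def pvTruncA (seq : List (List Int)) : List (List Int) :=
  if seq = [] then seq else pvTruncGoA seq

def get_sequences (board : List (List Int)) (col : Int) (y_start : Int) (x_start : Int) (length : Int) (d_y : Int) (d_x : Int) : List (List (List Int)) :=
  let p := pvLoopA board col y_start x_start d_y d_x 0 [] []
  (pvFlushA p.1 p.2).map pvTruncA

-- ===== PORT B =====
def pvGetColorB (board : List (List Int)) (r c : Int) : Option Int :=
  (PySem.List.pyGet? board r).bind (fun row => PySem.List.pyGet? row c)

-- pass 1: the visited squares with their match flag, stopping at the first IndexError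
def pvCellsB (board : List (List Int)) (col y x dy dx : Int) (i : Nat) : List (List Int × Bool) :=
  if i < board.length then
    match pvGetColorB board (y + (i : Int) * dy) (x + (i : Int) * dx) with
    | none => []
    | some c => ([y + (i : Int) * dy, x + (i : Int) * dx], c == col) :: pvCellsB board col y x dy dx (i + 1)
  else []
  termination_by board.length - i

def pvFlushB (seqs : List (List (List Int))) (run : List (List Int)) : List (List (List Int)) :=
  if run ∈ seqs then seqs else seqs ++ [run]

-- pass 2: one grouping step
def pvStepB (st : List (List (List Int)) × List (List Int)) (cell : List Int × Bool) :
    List (List (List Int)) × List (List Int) :=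
  if cell.2 then (st.1, st.2 ++ [cell.1]) else (pvFlushB st.1 st.2, [])

def pvNegB (sq : List Int) : Bool := decide (sq.getD 0 0 < 0) || decide (sq.getD 1 0 < 0)

-- pass 3: cut a run at its first negative coordinate
def pvCutB (seq : List (List Int)) : List (List Int) := seq.take (seq.findIdx pvNegB)

def get_sequences_alt (board : List (List Int)) (col : Int) (y_start : Int) (x_start : Int) (length : Int) (d_y : Int) (d_x : Int) : List (List (List Int)) :=
  let cells := pvCellsB board col y_start x_start d_y d_x 0
  let st := cells.foldl pvStepB ([], [])
  (pvFlushB st.1 st.2).map pvCutB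

-- ===== PRECONDITION & SPEC =====
def Spec_get_sequences (board : List (List Int)) (col : Int) (y_start : Int) (x_start : Int) (length : Int) (d_y : Int) (d_x : Int) (out : List (List (List Int))) : Prop := out = get_sequences_alt board col y_start x_start length d_y d_x
instance (board : List (List Int)) (col : Int) (y_start : Int) (x_start : Int) (length : Int) (d_y : Int) (d_x : Int) (out : List (List (List Int))) : Decidable (Spec_get_sequences board col y_start x_start length d_y d_x out) := by unfold Spec_get_sequences; infer_instance

-- ===== CLAIM (what is proved, stated in full; the proofs are below) =====
def Claim_equal_get_sequences : Prop := ∀ (board : List (List Int)) (col : Int) (y_start : Int) (x_start : Int) (length : Int) (d_y : Int) (d_x : Int), Dom_get_sequences board col y_start x_start length d_y d_x → Spec_get_sequences board col y_start x_start length d_y d_x (get_sequences board col y_start x_start length d_y d_x)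

-- ===== LEMMAS AND PROOFS =====

lemma flushAB (seqs : List (List (List Int))) (s : List (List Int)) :
    pvFlushA seqs s = pvFlushB seqs s := rfl

lemma flushA_idem (seqs : List (List (List Int))) (s : List (List Int)) :
    pvFlushA (pvFlushA seqs s) s = pvFlushA seqs s := by
  unfold pvFlushA
  split_ifs <;> simp_all

lemma getColorAB (board : List (List Int)) (r c : Int) :
    pvGetColorA board r c = pvGetColorB board r c := by
  unfold pvGetColorA pvGetColorB
  cases PySem.List.pyGet? board r <;> rfl

lemma loop_eq (board : List (List Int)) (col y x dy dx : Int) :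
    ∀ (n i : Nat) (seqs : List (List (List Int))) (s : List (List Int)),
      board.length - i = n →
      pvFlushA (pvLoopA board col y x dy dx i seqs s).1 (pvLoopA board col y x dy dx i seqs s).2
        = pvFlushB ((pvCellsB board col y x dy dx i).foldl pvStepB (seqs, s)).1
                   ((pvCellsB board col y x dy dx i).foldl pvStepB (seqs, s)).2 := by
  intro n
  induction n with
  | zero =>
    intro i seqs s hn
    have hi : ¬ i < board.length := by omega
    rw [pvLoopA, pvCellsB]
    simp [hi, flushAB]
  | succ n ih =>
    intro i seqs s hn
    by_cases hi : i < board.length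
    · rw [pvLoopA, pvCellsB]
      rw [getColorAB]
      cases hc : pvGetColorB board (y + (i : Int) * dy) (x + (i : Int) * dx) with
      | none =>
        simp only [hi, if_true, hc, List.foldl_nil]
        exact flushA_idem seqs s
      | some c =>
        by_cases hcol : c = col
        · simp only [hi, if_true, hc, hcol, List.foldl_cons]
          have : pvStepB (seqs, s) ([y + (i : Int) * dy, x + (i : Int) * dx], col == col)
              = (seqs, s ++ [[y + (i : Int) * dy, x + (i : Int) * dx]]) := by
            simp [pvStepB]
          rw [this]
          exact ih (i + 1) seqs (s ++ [[y + (i : Int) * dy, x + (i : Int) * dx]]) (by omega)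
        · have hbeq : (c == col) = false := by simp [hcol]
          simp only [hi, if_true, hc, hcol, if_false, List.foldl_cons]
          have : pvStepB (seqs, s) ([y + (i : Int) * dy, x + (i : Int) * dx], c == col)
              = (pvFlushB seqs s, []) := by
            simp [pvStepB, hbeq]
          rw [this, ← flushAB]
          exact ih (i + 1) (pvFlushA seqs s) [] (by omega)
    · rw [pvLoopA, pvCellsB]
      simp [hi, flushAB]

lemma truncGo_eq (seq : List (List Int)) :
    pvTruncGoA seq = pvCutB seq := by
  induction seq with
  | nil => rfl
  | cons sq rest ih =>
    unfold pvTruncGoA pvCutB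
    cases h : pvNegA sq with
    | true => simp [List.findIdx_cons, show pvNegB sq = true from h]
    | false =>
      simp [List.findIdx_cons, show pvNegB sq = false from h, List.take_succ_cons]
      rw [ih]; rfl

lemma truncAB : pvTruncA = pvCutB := by
  funext seq
  unfold pvTruncA
  split_ifs with h
  · subst h; rfl
  · exact truncGo_eq seq

-- ===== VERDICT (by name: the statement is the Claim_ definition above) =====
theorem get_sequences_spec : Claim_equal_get_sequences := by
  intro board col y_start x_start length d_y d_x _
  unfold Spec_get_sequences get_sequences get_sequences_alt
  rw [truncAB]
  exact congrArg (List.map pvCutB) (loop_eq board col y_start x_start d_y d_x (board.length - 0) 0 [] [] rfl)
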